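-- pv_equiv track=rewrite | github.com/kamilarakhimova/functions | 1.py | remove_palindroms
-- ===== SOURCE A (Python) =====
-- def remove_palindroms(spells):
--     l = spells
--     k = 0
--     for i in range(len(l)):
--         if ' ' in l[k]:
--             f = (l[k].lower()).split()
--             f = ''.join(f)
--         else:
--             f = l[k].lower()
--         if f == f[::-1]:
--             l.pop(k)
--             k -= 1
--         k += 1
--     return l
-- ===== SOURCE B (Python) =====
-- def remove_palindroms(spells):
--     def is_pal(s):
--         f = ''.join(s.lower().split()) if ' ' in s else s.lower()
--         return f == f[::-1]
--     spells[:] = [s for s in spells if not is_pal(s)]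
--     return spells
-- ===== Notes on version B (the rewrite author's own statement) =====
-- stated objective: simpler
-- what changed: Replaces the index-juggling pop/counter loop with a palindrome predicate and a single filtering pass rebuilt into the same list via slice assignment.
import Mathlib
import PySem

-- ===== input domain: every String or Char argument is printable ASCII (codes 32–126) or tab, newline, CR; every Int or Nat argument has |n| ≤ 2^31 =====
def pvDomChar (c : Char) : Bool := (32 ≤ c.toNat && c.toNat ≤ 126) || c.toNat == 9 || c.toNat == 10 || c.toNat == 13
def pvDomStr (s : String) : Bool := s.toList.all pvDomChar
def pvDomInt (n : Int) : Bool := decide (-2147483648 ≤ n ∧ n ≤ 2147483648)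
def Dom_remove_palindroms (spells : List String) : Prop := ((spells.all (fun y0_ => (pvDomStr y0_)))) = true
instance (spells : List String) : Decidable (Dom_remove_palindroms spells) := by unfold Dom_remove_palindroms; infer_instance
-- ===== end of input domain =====

-- B replaces A's pop/counter in-place removal loop with a palindrome predicate and one
-- filtering pass (rebuilt into the same list by slice assignment, so the mutation of the
-- argument is the same); equivalence proved about the return value.

-- ===== PORT A =====
-- one iteration of A's for-loop: state is (l, k)
def pvStepA (st : List String × Int) (_i : Int) : List String × Int :=
  match PySem.List.pyGet? st.1 st.2 with
  | none => st  -- unreachable: k is always in range in A's loop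
  | some s =>
    let f := if PySem.Str.isIn " " s then
        PySem.Str.join "" (PySem.Str.split₀ (PySem.Str.lower s))
      else PySem.Str.lower s
    if PySem.Str.slice? f none none (-1) == some f then
      match PySem.List.pop? st.1 st.2 with
      | some (_, l') => (l', (st.2 - 1) + 1)
      | none => (st.1, (st.2 - 1) + 1)  -- unreachable
    else (st.1, st.2 + 1)

def remove_palindroms (spells : List String) : List String :=
  ((PySem.List.pyRange 0 (spells.length : Int) 1).foldl pvStepA (spells, 0)).1

-- ===== PORT B =====
def pvIsPal (s : String) : Bool :=
  let f := if PySem.Str.isIn " " s then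
      PySem.Str.join "" (PySem.Str.split₀ (PySem.Str.lower s))
    else PySem.Str.lower s
  PySem.Str.slice? f none none (-1) == some f

def remove_palindroms_alt (spells : List String) : List String :=
  spells.filter (fun s => !pvIsPal s)

-- ===== PRECONDITION & SPEC =====
def Spec_remove_palindroms (spells : List String) (out : List String) : Prop := out = remove_palindroms_alt spells
instance (spells : List String) (out : List String) : Decidable (Spec_remove_palindroms spells out) := by unfold Spec_remove_palindroms; infer_instance

-- ===== CLAIM (what is proved, stated in full; the proofs are below) =====
def Claim_equal_remove_palindroms : Prop := ∀ (spells : List String), Dom_remove_palindroms spells → Spec_remove_palindroms spells (remove_palindroms spells)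

-- ===== LEMMAS AND PROOFS =====

-- One iteration of A's loop, expressed through B's predicate (definitional: the let-bound
-- normalization in pvStepA is exactly pvIsPal's body).
lemma pvStepA_eq (st : List String × Int) (i : Int) (s : String)
    (hget : PySem.List.pyGet? st.1 st.2 = some s) :
    pvStepA st i =
      if pvIsPal s then
        (match PySem.List.pop? st.1 st.2 with
         | some (_, l') => (l', (st.2 - 1) + 1)
         | none => (st.1, (st.2 - 1) + 1))
      else (st.1, st.2 + 1) := by
  unfold pvStepA
  rw [hget]
  rfl

-- Invariant of A's loop: the state is (kept prefix ++ unprocessed suffix) with k = length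
-- of the kept prefix; one loop iteration remains per suffix element.
set_option maxHeartbeats 1000000 in
lemma pvLoop (rest : List String) : ∀ (idxs : List Int) (acc : List String),
    idxs.length = rest.length →
    idxs.foldl pvStepA (acc ++ rest, (acc.length : Int)) =
      (acc ++ rest.filter (fun s => !pvIsPal s),
       ((acc ++ rest.filter (fun s => !pvIsPal s)).length : Int)) := by
  induction rest with
  | nil =>
    intro idxs acc h
    have : idxs = [] := List.eq_nil_of_length_eq_zero h
    subst this
    simp
  | cons s rest ih =>
    intro idxs acc h
    match idxs with
    | [] => simp at h
    | i :: idxs' =>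
      have hget : PySem.List.pyGet? (acc ++ s :: rest) ((acc.length : Int)) = some s := by
        rw [PySem.List.pyGet?_natCast]
        simp
      rw [List.foldl_cons, pvStepA_eq (acc ++ s :: rest, (acc.length : Int)) i s hget]
      by_cases hp : pvIsPal s = true
      · rw [if_pos hp]
        have hpop : PySem.List.pop? (acc ++ s :: rest) ((acc.length : Int)) =
            some (s, acc ++ rest) := by
          have hlt : acc.length < (acc ++ s :: rest).length := by simp
          rw [PySem.List.pop?_natCast _ _ hlt]
          have h1 : (acc ++ s :: rest)[acc.length] = s := by simp
          have h2 : (acc ++ s :: rest).eraseIdx acc.length = acc ++ rest := by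
            rw [List.eraseIdx_append_of_length_le (le_refl _)]; simp
          rw [h1, h2]
        rw [hpop]
        have hk : ((acc.length : Int) - 1) + 1 = (acc.length : Int) := by omega
        rw [show ((match (some (s, acc ++ rest) : Option (String × List String)) with
              | some (_, l') => (l', ((acc.length : Int) - 1) + 1)
              | none => (acc ++ s :: rest, ((acc.length : Int) - 1) + 1)) : List String × Int) =
            (acc ++ rest, ((acc.length : Int) - 1) + 1) from rfl, hk,
          ih idxs' acc (by simpa using h)]
        simp [hp]
      · rw [if_neg hp]
        have hcast : ((acc ++ s :: rest : List String), (acc.length : Int) + 1) =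
            ((acc ++ [s]) ++ rest, (((acc ++ [s]).length : Nat) : Int)) := by
          refine Prod.ext ?_ ?_
          · simp
          · simp
        rw [hcast, ih idxs' (acc ++ [s]) (by simpa using h)]
        have hp' : pvIsPal s = false := by simpa using hp
        simp [hp']

-- ===== VERDICT (by name: the statement is the Claim_ definition above) =====
set_option maxHeartbeats 1000000 in
theorem remove_palindroms_spec : Claim_equal_remove_palindroms := by
  intro spells _
  show remove_palindroms spells = remove_palindroms_alt spells
  unfold remove_palindroms remove_palindroms_alt
  have h := pvLoop spells (PySem.List.pyRange 0 (spells.length : Int) 1) []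
    (by simp [PySem.List.length_pyRange_one])
  simpa using congrArg Prod.fst h
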